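-- pv_equiv track=rewrite | github.com/iSweat-exe/iS-Tools-CLI | page3/passwordStrengthChecker.py | is_repeated_substring
-- ===== SOURCE A (Python) =====
-- def is_repeated_substring(pwd):
--     length = len(pwd)
--     for size in range(1, length // 2 + 1):
--         if length % size == 0:
--             sub = pwd[:size]
--             if sub * (length // size) == pwd:
--                 return True
--     return False
-- ===== SOURCE B (Python) =====
-- def is_repeated_substring(pwd):
--     return len(pwd) > 0 and pwd in (pwd + pwd)[1:-1]
-- ===== Notes on version B (the rewrite author's own statement) =====
-- stated objective: faster
-- what changed: Replaced the divisor-enumeration loop (try every size dividing len, rebuild the candidate repetition and compare) with the classic doubling trick: pwd is a repetition of a shorter substring iff it occurs inside (pwd+pwd)[1:-1].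
import Mathlib
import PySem

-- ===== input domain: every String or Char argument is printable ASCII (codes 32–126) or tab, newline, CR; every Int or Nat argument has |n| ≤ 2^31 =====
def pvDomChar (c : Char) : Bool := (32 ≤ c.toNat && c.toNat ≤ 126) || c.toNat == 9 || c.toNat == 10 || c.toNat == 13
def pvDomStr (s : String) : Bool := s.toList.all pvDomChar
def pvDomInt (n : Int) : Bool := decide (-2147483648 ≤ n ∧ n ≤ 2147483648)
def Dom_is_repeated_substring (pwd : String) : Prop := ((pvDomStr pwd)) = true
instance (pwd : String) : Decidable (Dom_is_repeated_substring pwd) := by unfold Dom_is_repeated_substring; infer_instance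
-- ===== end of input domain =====

-- B replaces A's divisor-enumeration loop by the doubling trick (pwd occurs in (pwd+pwd)[1:-1]); objective: faster (one substring search instead of one rebuild-and-compare per divisor).

-- ===== PORT A =====
def is_repeated_substring (pwd : String) : Bool :=
  let length : Int := PySem.Str.len pwd
  (PySem.List.pyRange 1 (PySem.Int.floordiv length 2 + 1)).any fun size =>
    decide (PySem.Int.mod length size = 0) &&
      (PySem.List.pyRepeat (PySem.Chars.slice pwd.toList none (some size))
          (PySem.Int.floordiv length size) == pwd.toList)

-- ===== PORT B =====
def is_repeated_substring_alt (pwd : String) : Bool :=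
  decide (0 < PySem.Str.len pwd) &&
    PySem.Chars.isIn pwd.toList
      (PySem.Chars.slice (pwd.toList ++ pwd.toList) (some 1) (some (-1)))

-- ===== PRECONDITION & SPEC =====
def Spec_is_repeated_substring (pwd : String) (out : Bool) : Prop := out = is_repeated_substring_alt pwd
instance (pwd : String) (out : Bool) : Decidable (Spec_is_repeated_substring pwd out) := by unfold Spec_is_repeated_substring; infer_instance

-- ===== CLAIM (what is proved, stated in full; the proofs are below) =====
def Claim_equal_is_repeated_substring : Prop := ∀ (pwd : String), Dom_is_repeated_substring pwd → Spec_is_repeated_substring pwd (is_repeated_substring pwd)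

-- ===== LEMMAS AND PROOFS =====

-- rotating by a multiple of a fixed point of rotate
theorem pv_rotate_mul {α : Type} (s : List α) (a k : Nat) (h : s.rotate a = s) :
    s.rotate (k * a) = s := by
  induction k with
  | zero => simp
  | succ k ih =>
    calc s.rotate ((k + 1) * a) = (s.rotate (k * a)).rotate a := by
            rw [List.rotate_rotate]; ring_nf
      _ = s := by rw [ih, h]

-- Euclid: the fixed rotations are closed under gcd
theorem pv_rotate_gcd {α : Type} (s : List α) (a b : Nat)
    (ha : s.rotate a = s) (hb : s.rotate b = s) : s.rotate (Nat.gcd a b) = s := by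
  induction a, b using Nat.gcd.induction with
  | H0 n => simpa using hb
  | H1 m n hm ih =>
    rw [Nat.gcd_rec]
    apply ih ?_ ha
    have hmul : s.rotate (m * (n / m)) = s := by
      have := pv_rotate_mul s m (n / m) ha
      simpa [Nat.mul_comm] using this
    have h1 : s.rotate (m * (n / m) + n % m) = s := by
      rw [Nat.div_add_mod n m]; exact hb
    rw [← List.rotate_rotate, hmul] at h1
    exact h1

-- a list fixed by rotation by a divisor of its length is a power of its prefix
theorem pv_pow_of_rotate {α : Type} : ∀ (n : Nat) (s : List α), s.length = n →
    ∀ d : Nat, 0 < d → d ∣ n → s.rotate d = s →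
    (List.replicate (n / d) (s.take d)).flatten = s := by
  intro n
  induction n using Nat.strong_induction_on with
  | _ n ih =>
    intro s hlen d hd hdvd hrot
    rcases Nat.eq_zero_or_pos n with hn0 | hn
    · subst hn0
      have : s = [] := List.length_eq_zero_iff.mp hlen
      subst this; simp
    · have hdn : d ≤ n := Nat.le_of_dvd hn hdvd
      have hrot' : s.drop d ++ s.take d = s := by
        rw [← List.rotate_eq_drop_append_take (by omega : d ≤ s.length)]; exact hrot
      have hkey : s.take d ++ s.drop d = s := List.take_append_drop d s
      rcases Nat.lt_or_ge d n with hdlt | hdge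
      · obtain ⟨k, hk⟩ := hdvd
        have hk2 : 2 ≤ k := by
          rcases Nat.lt_or_ge k 2 with h | h
          · exfalso; interval_cases k <;> omega
          · exact h
        obtain ⟨k', rfl⟩ : ∃ k', k = k' + 1 + 1 := ⟨k - 2, by omega⟩
        have hexp : n = d * k' + d + d := by rw [hk]; ring
        have hsub : n - d = d * (k' + 1) := by
          have h : d * (k' + 1) = d * k' + d := by ring
          omega
        have htlen : (s.take d).length = d := by rw [List.length_take]; omega
        have hrlen : (s.drop d).length = n - d := by simp [hlen]
        have hdr : d ≤ (s.drop d).length := by rw [hrlen]; omega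
        have htr : (s.drop d).take d = s.take d := by
          have h1 : (s.drop d ++ s.take d).take d = (s.drop d).take d :=
            List.take_append_of_le_length hdr
          rw [hrot'] at h1
          exact h1.symm
        have hr1 : s.drop d = s.take d ++ (s.drop d).drop d := by
          conv_lhs => rw [← List.take_append_drop d (s.drop d)]
          rw [htr]
        have hrrot : (s.drop d).rotate d = s.drop d := by
          rw [List.rotate_eq_drop_append_take hdr, htr]
          have : s.take d ++ ((s.drop d).drop d ++ s.take d) = s.take d ++ s.drop d := by
            rw [← List.append_assoc, ← hr1, hrot', hkey]
          exact (List.append_cancel_left this)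
        have hdvd' : d ∣ n - d := ⟨k' + 1, hsub⟩
        have ihr := ih (n - d) (by omega) (s.drop d) hrlen d hd hdvd' hrrot
        rw [htr] at ihr
        have hnd : (n - d) / d = k' + 1 := by
          rw [hsub, Nat.mul_div_cancel_left _ hd]
        have hn' : n / d = k' + 1 + 1 := by rw [hk, Nat.mul_div_cancel_left _ hd]
        rw [hn', List.replicate_succ, List.flatten_cons, ← hnd, ihr]
        exact hkey
      · have hde : d = n := le_antisymm hdn hdge
        subst hde
        rw [Nat.div_self hd]
        simp only [List.replicate_one, List.flatten_cons, List.flatten_nil, List.append_nil]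
        rw [← hlen, List.take_length]

-- converse: a power of its prefix is fixed by that rotation
theorem pv_rotate_of_pow {α : Type} (s : List α) (d k : Nat) (_hd : 0 < d) (hk : 0 < k)
    (hlen : s.length = d * k) (h : (List.replicate k (s.take d)).flatten = s) :
    s.rotate d = s := by
  obtain ⟨k', rfl⟩ : ∃ k', k = k' + 1 := ⟨k - 1, by omega⟩
  have hdn : d ≤ s.length := by
    calc d = d * 1 := (Nat.mul_one d).symm
      _ ≤ d * (k' + 1) := Nat.mul_le_mul_left d (by omega)
      _ = s.length := hlen.symm
  have htlen : (s.take d).length = d := by rw [List.length_take]; omega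
  have hsplit : s = s.take d ++ (List.replicate k' (s.take d)).flatten := by
    conv_lhs => rw [← h]
    rw [List.replicate_succ, List.flatten_cons]
  have hdrop : s.drop d = (List.replicate k' (s.take d)).flatten := by
    conv_lhs => rw [hsplit]
    exact List.drop_left' htlen
  rw [List.rotate_eq_drop_append_take hdn, hdrop]
  calc (List.replicate k' (s.take d)).flatten ++ s.take d
      = (List.replicate k' (s.take d) ++ [s.take d]).flatten := by simp
    _ = (List.replicate (k' + 1) (s.take d)).flatten := by rw [← List.replicate_succ']
    _ = s := h

-- occurrence of s at offset i in s++s is exactly a fixed rotation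
theorem pv_prefix_drop_iff_rotate {α : Type} (s : List α) (i : Nat) (hi : i ≤ s.length) :
    (s <+: (s ++ s).drop i) ↔ s.rotate i = s := by
  have hdrop : (s ++ s).drop i = s.drop i ++ s := List.drop_append_of_le_length hi
  have hlen : (s.drop i).length = s.length - i := by simp
  have htake : ((s ++ s).drop i).take s.length = s.rotate i := by
    rw [hdrop, List.take_append, List.take_of_length_le (by omega), hlen,
      List.rotate_eq_drop_append_take hi]
    congr 2
    omega
  constructor
  · intro h
    have := List.prefix_iff_eq_take.mp h
    rw [htake] at this
    exact this.symm
  · intro h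
    rw [List.prefix_iff_eq_take, htake, h]

-- the slice (s++s)[1:-1] computed
theorem pv_slice_eq {α : Type} (s : List α) (hn : 0 < s.length) :
    PySem.List.slice (s ++ s) (some 1) (some (-1)) =
      ((s ++ s).drop 1).take (2 * s.length - 2) := by
  have h2 : (s ++ s).length = 2 * s.length := by simp; omega
  have hc1 : PySem.List.clampIdx (s ++ s).length 1 = 1 := by
    simp [PySem.List.clampIdx]; omega
  have hcm : PySem.List.clampIdx (s ++ s).length (-1) = 2 * s.length - 1 := by
    rw [PySem.List.clampIdx_neg_one, h2]
  simp only [PySem.List.slice, hc1, hcm]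
  congr 1

-- B's test characterized by fixed rotations
theorem pv_infix_iff_rotate {α : Type} (s : List α) (hn : 0 < s.length) :
    (s <:+: PySem.List.slice (s ++ s) (some 1) (some (-1))) ↔
      ∃ j : Nat, 1 ≤ j ∧ j ≤ s.length - 1 ∧ s.rotate j = s := by
  rw [pv_slice_eq s hn]
  constructor
  · rintro ⟨u, v, huv⟩
    have hlenuv : u.length + s.length + v.length = 2 * s.length - 2 := by
      have h := congrArg List.length huv
      simp at h
      omega
    have hu : u.length ≤ s.length - 2 := by omega
    have hpref : s <+: (((s ++ s).drop 1).take (2 * s.length - 2)).drop u.length := by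
      rw [← huv, List.append_assoc, List.drop_left]
      exact List.prefix_append s v
    rw [List.drop_take, List.drop_drop] at hpref
    have hpref' : s <+: (s ++ s).drop (1 + u.length) :=
      (List.prefix_take_iff.mp hpref).1
    refine ⟨1 + u.length, by omega, by omega, ?_⟩
    exact (pv_prefix_drop_iff_rotate s (1 + u.length) (by omega)).mp hpref'
  · rintro ⟨j, hj1, hj2, hrot⟩
    have hn2 : 2 ≤ s.length := by omega
    have hpref : s <+: (s ++ s).drop j :=
      (pv_prefix_drop_iff_rotate s j (by omega)).mpr hrot
    have hpref2 : s <+: (((s ++ s).drop 1).take (2 * s.length - 2)).drop (j - 1) := by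
      rw [List.drop_take, List.drop_drop, List.prefix_take_iff]
      constructor
      · have h : 1 + (j - 1) = j := by omega
        rw [h]; exact hpref
      · omega
    exact List.infix_iff_prefix_suffix.mpr
      ⟨(((s ++ s).drop 1).take (2 * s.length - 2)).drop (j - 1), hpref2, List.drop_suffix _ _⟩

-- A's loop characterized: some divisor size ≤ n/2 makes the rebuilt repetition equal pwd
theorem pv_A_iff (pwd : String) :
    is_repeated_substring pwd = true ↔
      ∃ d : Nat, 1 ≤ d ∧ d ≤ pwd.toList.length / 2 ∧ d ∣ pwd.toList.length ∧
        (List.replicate (pwd.toList.length / d) (pwd.toList.take d)).flatten = pwd.toList := by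
  have hlen : PySem.Str.len pwd = (pwd.toList.length : Int) := PySem.Str.len_eq pwd
  have hfd : PySem.Int.floordiv ((pwd.toList.length : Nat) : Int) 2 = ((pwd.toList.length / 2 : Nat) : Int) := by
    simp [pysem]
  unfold is_repeated_substring
  rw [List.any_eq_true]
  constructor
  · rintro ⟨x, hmem, hx⟩
    rw [PySem.List.mem_pyRange_one, hlen, hfd] at hmem
    obtain ⟨hx1, hx2⟩ := hmem
    lift x to Nat using (by omega) with d hd
    rw [hlen] at hx
    simp only [Bool.and_eq_true, decide_eq_true_eq, beq_iff_eq] at hx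
    obtain ⟨hmod, hrep⟩ := hx
    have hdvd : d ∣ pwd.toList.length := by
      have := (PySem.Int.mod_eq_zero_iff_dvd _ _).mp hmod
      exact_mod_cast this
    refine ⟨d, by exact_mod_cast hx1, by exact_mod_cast (by omega : (d : Int) ≤ ((pwd.toList.length / 2 : Nat) : Int)), hdvd, ?_⟩
    rw [PySem.Chars.slice_eq_listSlice, PySem.List.slice_to _ (Int.natCast_nonneg d)] at hrep
    have hfd2 : PySem.Int.floordiv ((pwd.toList.length : Nat) : Int) (d : Int) = ((pwd.toList.length / d : Nat) : Int) := by
      simp [pysem]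
    rw [hfd2] at hrep
    simpa [PySem.List.pyRepeat] using hrep
  · rintro ⟨d, hd1, hd2, hdvd, hrep⟩
    refine ⟨(d : Int), ?_, ?_⟩
    · rw [PySem.List.mem_pyRange_one, hlen, hfd]
      exact ⟨by exact_mod_cast hd1, by exact_mod_cast (by omega : (d : Int) < ((pwd.toList.length / 2 : Nat) : Int) + 1)⟩
    · rw [hlen]
      simp only [Bool.and_eq_true, decide_eq_true_eq, beq_iff_eq]
      refine ⟨?_, ?_⟩
      · rw [PySem.Int.mod_eq_zero_iff_dvd]
        exact_mod_cast hdvd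
      · rw [PySem.Chars.slice_eq_listSlice, PySem.List.slice_to _ (Int.natCast_nonneg d)]
        have hfd2 : PySem.Int.floordiv ((pwd.toList.length : Nat) : Int) (d : Int) = ((pwd.toList.length / d : Nat) : Int) := by
          simp [pysem]
        rw [hfd2]
        simpa [PySem.List.pyRepeat] using hrep

-- B unfolded
theorem pv_B_iff (pwd : String) :
    is_repeated_substring_alt pwd = true ↔
      0 < pwd.toList.length ∧
        pwd.toList <:+: PySem.List.slice (pwd.toList ++ pwd.toList) (some 1) (some (-1)) := by
  unfold is_repeated_substring_alt
  rw [Bool.and_eq_true, decide_eq_true_eq, PySem.Str.len_eq,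
    PySem.Chars.isIn_iff_infix, PySem.Chars.slice_eq_listSlice]
  constructor
  · rintro ⟨h1, h2⟩; exact ⟨by exact_mod_cast h1, h2⟩
  · rintro ⟨h1, h2⟩; exact ⟨by exact_mod_cast h1, h2⟩

theorem pv_main (pwd : String) : is_repeated_substring pwd = is_repeated_substring_alt pwd := by
  rw [Bool.eq_iff_iff, pv_A_iff, pv_B_iff]
  constructor
  · rintro ⟨d, hd1, hd2, hdvd, hrep⟩
    have h2d : d * 2 ≤ pwd.toList.length := (Nat.le_div_iff_mul_le (by norm_num)).mp hd2
    have hnpos : 0 < pwd.toList.length := by omega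
    obtain ⟨k, hk⟩ := hdvd
    have hk2 : 0 < k := by
      rcases Nat.eq_zero_or_pos k with h | h
      · exfalso; subst h; rw [Nat.mul_zero] at hk; omega
      · exact h
    have hrot : pwd.toList.rotate d = pwd.toList := by
      apply pv_rotate_of_pow pwd.toList d k (by omega) hk2 hk
      have h : pwd.toList.length / d = k := by rw [hk, Nat.mul_div_cancel_left _ (by omega : 0 < d)]
      rw [← h]
      exact hrep
    exact ⟨hnpos, (pv_infix_iff_rotate pwd.toList hnpos).mpr ⟨d, hd1, by omega, hrot⟩⟩
  · rintro ⟨hnpos, hinf⟩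
    obtain ⟨j, hj1, hj2, hrot⟩ := (pv_infix_iff_rotate pwd.toList hnpos).mp hinf
    have hrotn : pwd.toList.rotate pwd.toList.length = pwd.toList := List.rotate_length pwd.toList
    have hrotg : pwd.toList.rotate (Nat.gcd j pwd.toList.length) = pwd.toList :=
      pv_rotate_gcd pwd.toList j pwd.toList.length hrot hrotn
    have hgdvd : Nat.gcd j pwd.toList.length ∣ pwd.toList.length := Nat.gcd_dvd_right _ _
    have hgpos : 0 < Nat.gcd j pwd.toList.length := Nat.gcd_pos_of_pos_left _ (by omega)
    have hgle : Nat.gcd j pwd.toList.length ≤ j := Nat.gcd_le_left _ (by omega)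
    obtain ⟨m, hm⟩ := hgdvd
    have hm2 : 2 ≤ m := by
      rcases Nat.lt_or_ge m 2 with h | h
      · exfalso; interval_cases m <;> omega
      · exact h
    have hghalf : Nat.gcd j pwd.toList.length ≤ pwd.toList.length / 2 := by
      rw [Nat.le_div_iff_mul_le (by norm_num)]
      calc Nat.gcd j pwd.toList.length * 2 ≤ Nat.gcd j pwd.toList.length * m :=
            Nat.mul_le_mul_left _ hm2
        _ = pwd.toList.length := hm.symm
    exact ⟨Nat.gcd j pwd.toList.length, hgpos, hghalf, ⟨m, hm⟩,
      pv_pow_of_rotate pwd.toList.length pwd.toList rfl _ hgpos ⟨m, hm⟩ hrotg⟩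

-- ===== VERDICT (by name: the statement is the Claim_ definition above) =====
theorem is_repeated_substring_spec : Claim_equal_is_repeated_substring := by
  intro pwd _
  unfold Spec_is_repeated_substring
  exact pv_main pwd
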